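/- GENERATED by farm/mkstatement.py from design/units.tsv (unit `start_decoder.C7b`) and the assertions of Vorbis/Spec/StartDecoderC7.lean — do not edit.
   THE STATEMENT of the proof unit `start_decoder.C7b`: segment C7b of `start_decoder` (14 instructions; entries 0x1149ba;
   exits 0x113b22; ranges 0x1149ba-0x1149f1)
   takes each of its entry assertions to one of its exit assertions (`Vorbis.Spec.StartDecoder.SegC7b`), given the contracts of its callees.
   What the names mean: Vorbis/Spec/Basic.lean (the shared hypotheses), Vorbis/Spec/StartDecoderC7.lean (the assertions). The theorem to prove:
   `theorem start_decoder_C7b_ok : Vorbis.Spec.start_decoder_C7b.Statement`. -/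
import Vorbis.Spec.Alloc
import Vorbis.Spec.Leaves
import Vorbis.Spec.StartDecoderC7
namespace Vorbis.Spec.start_decoder_C7b
open X86 X86.User Asan

/-- The statement of unit `start_decoder.C7b`. -/
def Statement : Prop :=
  ∀ (Lay : Layout) (_hLay : Lay.hi = 0x1000000) (μ : Microarch) (_hμ : UserX.MicroOK μ) (u₀ : State)
    (_hcode : HasCodeNat Lay u₀ Vorbis.L.start_decoder.entry Vorbis.Code.code_start_decoder.nat Vorbis.L.start_decoder.size)
    (_h_asan_load1_noabort : Asan.SmallCheck Lay μ Vorbis.WayInv (Vorbis.CodeOK u₀) [.rax, .rdx] 1 Vorbis.L.__asan_load1_noabort.entry)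
    (_h_error : ∀ (others : List Obj) (frames : List (Nat × FrameLayout)), Calls Lay μ Vorbis.WayInv (Vorbis.conv u₀) Vorbis.L.error.entry (Vorbis.Spec.error.spec others frames))
    (_h_setup_temp_free : ∀ (others : List Obj) (frames : List (Nat × FrameLayout)), Calls Lay μ Vorbis.WayInv (Vorbis.conv u₀) Vorbis.L.setup_temp_free.entry (Vorbis.Spec.setup_temp_free.weakSpec others frames)),
    Vorbis.Spec.StartDecoder.SegC7b Lay μ u₀

end Vorbis.Spec.start_decoder_C7b
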